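-- pv_equiv track=rewrite | github.com/aeiwz/FrameX | benchmarks/benchmark_suite.py | _object_chunk_kernel
-- ===== SOURCE A (Python) =====
-- from typing import Any, Callable, Sequence
--
-- def _object_chunk_kernel(chunk: Sequence[str]) -> int:
--     # Python object workload (GIL-heavy): better candidate for processes.
--     vowels = {"a", "e", "i", "o", "u"}
--     total = 0
--     for item in chunk:
--         c = 0
--         for ch in item:
--             if ch in vowels:
--                 c += 1
--         total += c
--     return total
-- ===== SOURCE B (Python) =====
-- def _object_chunk_kernel(chunk):
--     # Idiomatic rewrite: per-vowel str.count over each string instead of a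
--     # char-by-char membership loop.
--     total = 0
--     for item in chunk:
--         for v in "aeiou":
--             total += item.count(v)
--     return total
-- ===== Notes on version B (the rewrite author's own statement) =====
-- stated objective: idiomatic
-- what changed: B replaces the per-character membership loop with five str.count scans per string (loop over the vowel alphabet), summing directly into the total.
import Mathlib
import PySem

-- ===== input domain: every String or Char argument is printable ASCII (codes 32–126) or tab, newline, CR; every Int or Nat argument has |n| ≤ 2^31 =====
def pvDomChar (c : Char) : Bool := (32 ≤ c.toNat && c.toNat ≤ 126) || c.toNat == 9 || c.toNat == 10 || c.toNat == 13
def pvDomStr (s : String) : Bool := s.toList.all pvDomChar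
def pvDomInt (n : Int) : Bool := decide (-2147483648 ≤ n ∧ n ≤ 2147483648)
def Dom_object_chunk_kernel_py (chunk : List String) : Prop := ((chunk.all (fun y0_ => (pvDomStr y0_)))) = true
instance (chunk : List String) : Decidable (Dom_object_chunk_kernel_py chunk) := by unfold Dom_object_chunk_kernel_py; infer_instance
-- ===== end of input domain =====

-- B counts vowels per vowel with str.count instead of a per-character membership loop (idiomatic; same asymptotic cost).

-- ===== PORT A =====
-- vowels = {"a", "e", "i", "o", "u"}  (a set of 1-char strings; iteration over item yields its chars)
def pvVowelsA : PySem.Set Char := PySem.Set.ofList ['a', 'e', 'i', 'o', 'u']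

def object_chunk_kernel_py (chunk : List String) : Int :=
  chunk.foldl
    (fun total item =>
      let c : Int :=
        item.toList.foldl (fun c ch => if PySem.Set.contains pvVowelsA ch then c + 1 else c) 0
      total + c)
    0

-- ===== PORT B =====
def object_chunk_kernel_py_alt (chunk : List String) : Int :=
  chunk.foldl
    (fun total item =>
      "aeiou".toList.foldl
        (fun t v => t + (PySem.Str.count item (String.ofList [v]) : Int)) total)
    0

-- ===== PRECONDITION & SPEC =====
def Spec_object_chunk_kernel_py (chunk : List String) (out : Int) : Prop := out = object_chunk_kernel_py_alt chunk
instance (chunk : List String) (out : Int) : Decidable (Spec_object_chunk_kernel_py chunk out) := by unfold Spec_object_chunk_kernel_py; infer_instance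

-- ===== CLAIM (what is proved, stated in full; the proofs are below) =====
def Claim_equal_object_chunk_kernel_py : Prop := ∀ (chunk : List String), Dom_object_chunk_kernel_py chunk → Spec_object_chunk_kernel_py chunk (object_chunk_kernel_py chunk)

-- ===== LEMMAS AND PROOFS =====

-- PySem.Chars.count with a single-char needle is plain List.count.
theorem count_go_singleton (v : Char) (l : List Char) (fuel acc : Nat)
    (h : l.length ≤ fuel) :
    PySem.Chars.count.go [v] fuel l acc = acc + l.count v := by
  induction l generalizing fuel acc with
  | nil => cases fuel <;> simp [PySem.Chars.count.go]
  | cons c t ih =>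
    cases fuel with
    | zero => simp at h
    | succ f =>
      have hf : t.length ≤ f := by simpa using h
      by_cases hv : v = c
      · subst hv
        simp [PySem.Chars.count.go, List.isPrefixOf, ih _ _ hf]
        omega
      · have hpre : ([v].isPrefixOf (c :: t)) = false := by
          simp [List.isPrefixOf]
          exact hv
        simp [PySem.Chars.count.go, hpre, ih _ _ hf, List.count_cons]
        exact fun h => hv h.symm

theorem chars_count_singleton (cs : List Char) (v : Char) :
    PySem.Chars.count cs [v] = cs.count v := by
  simp [PySem.Chars.count, count_go_singleton v cs cs.length 0 le_rfl]

-- A's membership count equals the sum of the five per-vowel counts.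
theorem countP_vowels (cs : List Char) :
    cs.countP (fun ch => PySem.Set.contains pvVowelsA ch)
      = cs.count 'a' + cs.count 'e' + cs.count 'i' + cs.count 'o' + cs.count 'u' := by
  induction cs with
  | nil => simp
  | cons c t ih =>
    by_cases h1 : c = 'a' <;> by_cases h2 : c = 'e' <;> by_cases h3 : c = 'i' <;>
      by_cases h4 : c = 'o' <;> by_cases h5 : c = 'u' <;>
      simp_all [pvVowelsA, PySem.Set.ofList] <;> omega

-- one chunk item contributes the same amount on both sides
theorem item_step (x : String) (total : Int) :
    total + x.toList.foldl
        (fun c ch => if PySem.Set.contains pvVowelsA ch then c + 1 else c) (0 : Int)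
      = "aeiou".toList.foldl
        (fun t v => t + (PySem.Str.count x (String.ofList [v]) : Int)) total := by
  have hx : x.toList.foldl
      (fun c ch => if PySem.Set.contains pvVowelsA ch then c + 1 else c) (0 : Int)
      = (x.toList.countP (fun ch => PySem.Set.contains pvVowelsA ch) : Int) := by
    simpa using PySem.List.foldl_if_add_one
      (fun ch => PySem.Set.contains pvVowelsA ch) x.toList 0
  have hc : ∀ v : Char, PySem.Str.count x (String.ofList [v]) = x.toList.count v := by
    intro v
    have h1 : (String.ofList [v]).toList = [v] := by simp
    rw [PySem.Str.count_eq, h1, chars_count_singleton]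
  have hl : "aeiou".toList = ['a', 'e', 'i', 'o', 'u'] := rfl
  rw [hl]
  simp only [List.foldl_cons, List.foldl_nil, hc, hx, countP_vowels]
  push_cast
  ring

theorem fold_eq (chunk : List String) (total : Int) :
    chunk.foldl
      (fun total item =>
        let c : Int :=
          item.toList.foldl (fun c ch => if PySem.Set.contains pvVowelsA ch then c + 1 else c) 0
        total + c) total
    = chunk.foldl
      (fun total item =>
        "aeiou".toList.foldl
          (fun t v => t + (PySem.Str.count item (String.ofList [v]) : Int)) total) total := by
  induction chunk generalizing total with
  | nil => rfl
  | cons x xs ih =>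
    simp only [List.foldl_cons]
    rw [← item_step x total, ih]

-- ===== VERDICT (by name: the statement is the Claim_ definition above) =====
theorem object_chunk_kernel_py_spec : Claim_equal_object_chunk_kernel_py := by
  intro chunk _
  unfold Spec_object_chunk_kernel_py object_chunk_kernel_py object_chunk_kernel_py_alt
  exact fold_eq chunk 0
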